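-- pv_equiv track=rewrite | github.com/AlgorithmEngineerSHY/practice | array/medium/Find_First_and_Last_Position_of_Element_in_Sorted_Array.py | helper
-- ===== SOURCE A (Python) =====
-- def helper(nums, target, left):
--     low, high = 0, len(nums)
--     while low < high:
--         mid = (low + high) // 2
--         if target < nums[mid] or (left and target == nums[mid]):
--             high = mid
--         else:
--             low = mid + 1
--     return low
-- ===== SOURCE B (Python) =====
-- def helper(nums, target, left):
--     def rec(low, n):
--         if n == 0:
--             return low
--         half = n // 2
--         mid = low + half
--         if target < nums[mid] or (left and target == nums[mid]):
--             return rec(low, half)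
--         return rec(mid + 1, n - half - 1)
--     return rec(0, len(nums))
-- ===== Notes on version B (the rewrite author's own statement) =====
-- stated objective: alternative
-- what changed: Replaces the iterative while-loop over a (low, high) half-open interval with a divide-and-conquer recursion on the remaining segment size n, computing mid = low + n//2 and recursing into the half-sized subproblem.
import Mathlib
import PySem

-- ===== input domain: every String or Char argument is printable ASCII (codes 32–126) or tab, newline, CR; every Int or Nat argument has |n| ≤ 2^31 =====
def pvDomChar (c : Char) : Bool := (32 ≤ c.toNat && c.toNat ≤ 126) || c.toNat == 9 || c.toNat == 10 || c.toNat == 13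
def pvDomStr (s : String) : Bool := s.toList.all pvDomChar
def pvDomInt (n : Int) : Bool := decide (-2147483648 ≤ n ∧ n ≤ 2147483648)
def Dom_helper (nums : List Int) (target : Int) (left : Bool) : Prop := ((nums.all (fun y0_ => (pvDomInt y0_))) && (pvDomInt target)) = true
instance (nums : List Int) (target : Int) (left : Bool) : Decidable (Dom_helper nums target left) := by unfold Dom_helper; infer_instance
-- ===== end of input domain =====

-- B replaces A's iterative (low, high) while-loop by a recursion on the remaining segment size (alternative decomposition, same cost).


-- ===== PORT A =====
-- while-loop of A as tail recursion over (low, high), half-open interval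
def helperLoop (nums : List Int) (target : Int) (left : Bool) (low high : Nat) : Nat :=
  if _h : low < high then
    if target < nums.getD ((low + high) / 2) 0 ∨ (left ∧ target = nums.getD ((low + high) / 2) 0) then
      helperLoop nums target left low ((low + high) / 2)
    else
      helperLoop nums target left ((low + high) / 2 + 1) high
  else low
termination_by high - low
decreasing_by all_goals omega

def helper (nums : List Int) (target : Int) (left : Bool) : Int :=
  (helperLoop nums target left 0 nums.length : Int)

-- ===== PORT B =====
-- B: recursion on the remaining segment SIZE n; mid = low + n/2
def helperRec (nums : List Int) (target : Int) (left : Bool) (low : Nat) : Nat → Nat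
  | 0 => low
  | n + 1 =>
    let half := (n + 1) / 2
    let mid := low + half
    if target < nums.getD mid 0 ∨ (left ∧ target = nums.getD mid 0) then
      helperRec nums target left low half
    else
      helperRec nums target left (mid + 1) (n + 1 - half - 1)
termination_by n => n
decreasing_by all_goals omega

def helper_alt (nums : List Int) (target : Int) (left : Bool) : Int :=
  (helperRec nums target left 0 nums.length : Int)

-- ===== PRECONDITION & SPEC =====
def Spec_helper (nums : List Int) (target : Int) (left : Bool) (out : Int) : Prop := out = helper_alt nums target left
instance (nums : List Int) (target : Int) (left : Bool) (out : Int) : Decidable (Spec_helper nums target left out) := by unfold Spec_helper; infer_instance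

-- ===== CLAIM (what is proved, stated in full; the proofs are below) =====
def Claim_equal_helper : Prop := ∀ (nums : List Int) (target : Int) (left : Bool), Dom_helper nums target left → Spec_helper nums target left (helper nums target left)

-- ===== LEMMAS AND PROOFS =====

lemma loop_eq_rec (nums : List Int) (target : Int) (left : Bool) :
    ∀ n low, helperLoop nums target left low (low + n) = helperRec nums target left low n := by
  intro n
  induction n using Nat.strong_induction_on with
  | _ n ih =>
    intro low
    match n with
    | 0 =>
      rw [helperLoop, helperRec]
      simp
    | m + 1 =>
      rw [helperLoop, helperRec]
      have hmid : (low + (low + (m + 1))) / 2 = low + (m + 1) / 2 := by omega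
      simp only [hmid, show low < low + (m + 1) by omega, dif_pos]
      split
      · exact ih _ (by omega) low
      · have h2 : low + (m + 1) = (low + (m + 1) / 2 + 1) + (m + 1 - (m + 1) / 2 - 1) := by omega
        rw [h2, ih _ (by omega)]

-- ===== VERDICT (by name: the statement is the Claim_ definition above) =====
theorem helper_spec : Claim_equal_helper := by
  intro nums target left _
  unfold Spec_helper helper helper_alt
  rw [show nums.length = 0 + nums.length from (Nat.zero_add _).symm, loop_eq_rec]
  rw [Nat.zero_add]
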